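-- pv_equiv track=rewrite | github.com/bobobobosu/SMARTER | bert_event_annotator.py | _get_bert_token_indexes_no_spacing
-- ===== SOURCE A (Python) =====
-- def _get_bert_token_indexes_no_spacing(tokens):
--     i = 0
--     indexes = []
--     for token in tokens[1:-1]:
--         tok_len = 1 if token == "[UNK]" else len(token)
--         if token.startswith("##"):
--             tok_len -= 2
--         indexes.append((i, i + tok_len))
--         i += tok_len
--     return indexes
-- ===== SOURCE B (Python) =====
-- def _get_bert_token_indexes_no_spacing(tokens):
--     lengths = [
--         (1 if t == "[UNK]" else len(t)) - (2 if t.startswith("##") else 0)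
--         for t in tokens[1:-1]
--     ]
--     ends = []
--     total = 0
--     for l in lengths:
--         total += l
--         ends.append(total)
--     return list(zip([0] + ends[:-1], ends))
-- ===== Notes on version B (the rewrite author's own statement) =====
-- stated objective: alternative
-- what changed: Replaces the inline running-offset loop that appends (i, i+tok_len) pairs with a three-stage pipeline: a lengths table for tokens[1:-1], a cumulative-ends pass, and a zip of each end with the previous end ([0]+ends[:-1]).
import Mathlib
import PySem

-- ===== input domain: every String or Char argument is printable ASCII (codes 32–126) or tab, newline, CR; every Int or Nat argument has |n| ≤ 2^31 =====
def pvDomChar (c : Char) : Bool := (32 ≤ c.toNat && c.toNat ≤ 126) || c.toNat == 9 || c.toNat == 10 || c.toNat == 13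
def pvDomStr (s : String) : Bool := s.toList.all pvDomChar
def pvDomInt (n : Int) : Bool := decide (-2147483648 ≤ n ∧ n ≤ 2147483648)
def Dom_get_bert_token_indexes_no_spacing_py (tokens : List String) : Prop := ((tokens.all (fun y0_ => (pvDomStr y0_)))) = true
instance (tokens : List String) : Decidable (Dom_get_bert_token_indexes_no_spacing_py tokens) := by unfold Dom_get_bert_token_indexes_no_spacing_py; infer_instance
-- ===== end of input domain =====

-- B restructures A's single accumulator loop into a lengths table, a cumulative-ends pass,
-- and a zip of consecutive ends (objective: alternative decomposition, same cost).

-- ===== PORT A =====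
def get_bert_token_indexes_no_spacing_py (tokens : List String) : List (Int × Int) :=
  ((PySem.List.slice tokens (some 1) (some (-1))).foldl
    (fun (s : Int × List (Int × Int)) token =>
      let tokLen0 : Int := if token = "[UNK]" then 1 else (PySem.Str.len token : Int)
      let tokLen : Int := if PySem.Str.startswith token "##" then tokLen0 - 2 else tokLen0
      (s.1 + tokLen, s.2 ++ [(s.1, s.1 + tokLen)]))
    (0, [])).2

-- ===== PORT B =====
def get_bert_token_indexes_no_spacing_py_alt (tokens : List String) : List (Int × Int) :=
  let lengths : List Int :=
    (PySem.List.slice tokens (some 1) (some (-1))).map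
      (fun t => (if t = "[UNK]" then (1 : Int) else (PySem.Str.len t : Int)) -
                (if PySem.Str.startswith t "##" then 2 else 0))
  let ends : List Int :=
    (lengths.foldl (fun (p : Int × List Int) l => (p.1 + l, p.2 ++ [p.1 + l])) (0, [])).2
  List.zip ((0 : Int) :: PySem.List.slice ends none (some (-1))) ends

-- ===== PRECONDITION & SPEC =====
def Spec_get_bert_token_indexes_no_spacing_py (tokens : List String) (out : List (Int × Int)) : Prop := out = get_bert_token_indexes_no_spacing_py_alt tokens
instance (tokens : List String) (out : List (Int × Int)) : Decidable (Spec_get_bert_token_indexes_no_spacing_py tokens out) := by unfold Spec_get_bert_token_indexes_no_spacing_py; infer_instance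

-- ===== CLAIM (what is proved, stated in full; the proofs are below) =====
def Claim_equal_get_bert_token_indexes_no_spacing_py : Prop := ∀ (tokens : List String), Dom_get_bert_token_indexes_no_spacing_py tokens → Spec_get_bert_token_indexes_no_spacing_py tokens (get_bert_token_indexes_no_spacing_py tokens)

-- ===== LEMMAS AND PROOFS =====

-- per-token length, as B computes it (B's map body, literally)
def pvTokLen (t : String) : Int :=
  (if t = "[UNK]" then (1 : Int) else (PySem.Str.len t : Int)) -
  (if PySem.Str.startswith t "##" then 2 else 0)

-- the spans both programs produce, recursively
def pvSpans : List String → Int → List (Int × Int)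
  | [], _ => []
  | t :: ts, i => (i, i + pvTokLen t) :: pvSpans ts (i + pvTokLen t)

-- the cumulative ends B produces, recursively
def pvEnds : List Int → Int → List Int
  | [], _ => []
  | l :: ls, e => (e + l) :: pvEnds ls (e + l)

lemma tokLen_A (t : String) :
    (if PySem.Str.startswith t "##" then
       (if t = "[UNK]" then (1 : Int) else (PySem.Str.len t : Int)) - 2
     else (if t = "[UNK]" then (1 : Int) else (PySem.Str.len t : Int))) = pvTokLen t := by
  unfold pvTokLen; split_ifs <;> ring

lemma foldA_eq (ts : List String) (i : Int) (acc : List (Int × Int)) :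
    (ts.foldl
      (fun (s : Int × List (Int × Int)) token =>
        let tokLen0 : Int := if token = "[UNK]" then 1 else (PySem.Str.len token : Int)
        let tokLen : Int := if PySem.Str.startswith token "##" then tokLen0 - 2 else tokLen0
        (s.1 + tokLen, s.2 ++ [(s.1, s.1 + tokLen)]))
      (i, acc)).2 = acc ++ pvSpans ts i := by
  induction ts generalizing i acc with
  | nil => simp [pvSpans]
  | cons t ts ih =>
    simp only [List.foldl_cons, tokLen_A t]
    rw [ih]
    simp [pvSpans, List.append_assoc]

lemma foldE_eq (ls : List Int) (e : Int) (es : List Int) :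
    (ls.foldl (fun (p : Int × List Int) l => (p.1 + l, p.2 ++ [p.1 + l])) (e, es)).2
      = es ++ pvEnds ls e := by
  induction ls generalizing e es with
  | nil => simp [pvEnds]
  | cons l ls ih => simp [pvEnds, ih, List.append_assoc]

lemma zip_ends_spans (ts : List String) (i : Int) :
    List.zip (i :: (pvEnds (ts.map pvTokLen) i).dropLast) (pvEnds (ts.map pvTokLen) i)
      = pvSpans ts i := by
  induction ts generalizing i with
  | nil => simp [pvEnds, pvSpans]
  | cons t ts ih =>
    cases ts with
    | nil => simp [pvEnds, pvSpans]
    | cons u us =>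
      simp only [List.map_cons, pvEnds, pvSpans, List.dropLast_cons₂, List.zip_cons_cons]
      exact congrArg _ (ih (i + pvTokLen t))

-- ===== VERDICT (by name: the statement is the Claim_ definition above) =====
theorem get_bert_token_indexes_no_spacing_py_spec : Claim_equal_get_bert_token_indexes_no_spacing_py := by
  intro tokens _
  unfold Spec_get_bert_token_indexes_no_spacing_py
  unfold get_bert_token_indexes_no_spacing_py get_bert_token_indexes_no_spacing_py_alt
  rw [foldA_eq]
  rw [show ((PySem.List.slice tokens (some 1) (some (-1))).map
      (fun t => (if t = "[UNK]" then (1 : Int) else (PySem.Str.len t : Int)) -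
                (if PySem.Str.startswith t "##" then 2 else 0))) =
      (PySem.List.slice tokens (some 1) (some (-1))).map pvTokLen from rfl]
  simp only [foldE_eq, PySem.List.slice_to_neg_one, List.nil_append, zip_ends_spans]
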